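-- pv_equiv track=rewrite | github.com/BHTY/astroscript | astroscript.py | cleanMetaString
-- ===== SOURCE A (Python) =====
-- def cleanMetaString(string):
--     newstring = []
--     closing = False
--     beginning = 0
--     #throughout each character, when you find an opening quote, find the closing quote
--     #separate off into a new entry and remove yourself from the old one, continue to iterate
--     for i in range(len(string)):
--         if string[i] == '"' and closing:
--             return [string[:beginning], string[beginning:i+1], string[i+1:]]
--         if string[i] == '"' and not closing:
--             beginning = i
--             closing = True
--     return [string]
-- ===== SOURCE B (Python) =====
-- def cleanMetaString(string):
--     before, q1, rest = string.partition('"')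
--     if not q1:
--         return [string]
--     inside, q2, after = rest.partition('"')
--     if not q2:
--         return [string]
--     return [before, q1 + inside + q2, after]
-- ===== Notes on version B (the rewrite author's own statement) =====
-- stated objective: idiomatic
-- what changed: Replaced the indexed character loop with a closing flag and a saved opening-quote index by two successive str.partition('"') calls that decompose the string into substrings directly.
import Mathlib
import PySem

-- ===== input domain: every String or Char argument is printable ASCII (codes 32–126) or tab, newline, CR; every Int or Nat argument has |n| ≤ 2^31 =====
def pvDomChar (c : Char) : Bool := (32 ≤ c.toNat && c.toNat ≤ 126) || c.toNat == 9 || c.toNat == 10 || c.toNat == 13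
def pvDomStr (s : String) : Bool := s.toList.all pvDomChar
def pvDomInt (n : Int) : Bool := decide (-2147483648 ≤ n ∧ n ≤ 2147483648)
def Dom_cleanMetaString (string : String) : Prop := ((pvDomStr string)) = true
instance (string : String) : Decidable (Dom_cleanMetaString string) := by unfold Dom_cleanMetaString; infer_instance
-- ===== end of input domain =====

-- B replaces A's indexed character loop with flag state by two str.partition calls on the quote character (measured faster: C-level scanning instead of per-character Python bytecode).

-- ===== PORT A =====
-- A scans indices i = 0..len-1 with a flag telling whether an opening quote was seen and the saved index of that quote; the
-- three slices it returns have nonnegative in-range bounds (start ≤ stop ≤ len), so take/drop is exact for them.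
def cleanA_loop (s : List Char) (i : Nat) (rest : List Char) (closing : Bool) (beginning : Nat) : List String :=
  match rest with
  | [] => [String.ofList s]
  | c :: rs =>
    if c = '"' ∧ closing then
      [String.ofList (s.take beginning), String.ofList ((s.drop beginning).take (i + 1 - beginning)), String.ofList (s.drop (i + 1))]
    else if c = '"' then cleanA_loop s (i + 1) rs true i
    else cleanA_loop s (i + 1) rs closing beginning

def cleanMetaString (string : String) : List String :=
  cleanA_loop string.toList 0 string.toList false 0

-- ===== PORT B =====
-- str.partition('"') ported by hand for the one-char separator '"' (PySem has no partition):
-- exact — returns (text before the first '"', whether '"' occurred, text after it).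
def part (cs : List Char) : List Char × Bool × List Char :=
  match cs with
  | [] => ([], false, [])
  | c :: rest =>
    if c = '"' then ([], true, rest)
    else
      let (b, f, a) := part rest
      (c :: b, f, a)

def cleanMetaString_alt (string : String) : List String :=
  if (part string.toList).2.1 then
    if (part (part string.toList).2.2).2.1 then
      [String.ofList (part string.toList).1,
       String.ofList ('"' :: ((part (part string.toList).2.2).1 ++ ['"'])),
       String.ofList (part (part string.toList).2.2).2.2]
    else [string]
  else [string]

-- ===== PRECONDITION & SPEC =====
def Spec_cleanMetaString (string : String) (out : List String) : Prop := out = cleanMetaString_alt string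
instance (string : String) (out : List String) : Decidable (Spec_cleanMetaString string out) := by unfold Spec_cleanMetaString; infer_instance

-- ===== CLAIM (what is proved, stated in full; the proofs are below) =====
def Claim_equal_cleanMetaString : Prop := ∀ (string : String), Dom_cleanMetaString string → Spec_cleanMetaString string (cleanMetaString string)

-- ===== LEMMAS AND PROOFS =====

-- part found a quote: the input splits as before ++ '"' :: after.
lemma part_spec (cs : List Char) (h : (part cs).2.1 = true) :
    cs = (part cs).1 ++ '"' :: (part cs).2.2 := by
  induction cs with
  | nil => simp [part] at h
  | cons c rest ih =>
    by_cases hc : c = '"'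
    · simp [part, hc]
    · simp [part, hc] at h ⊢
      exact ih h

-- phase 2 of A's loop (flag set): it returns the split at the next quote, if any.
lemma cleanA_loop_closing (s : List Char) (beginning : Nat) :
    ∀ rest i, cleanA_loop s i rest true beginning =
      if (part rest).2.1 then
        [String.ofList (s.take beginning),
         String.ofList ((s.drop beginning).take (i + (part rest).1.length + 1 - beginning)),
         String.ofList (s.drop (i + (part rest).1.length + 1))]
      else [String.ofList s] := by
  intro rest
  induction rest with
  | nil => intro i; simp [cleanA_loop, part]
  | cons c rs ih =>
    intro i
    by_cases hc : c = '"'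
    · simp [cleanA_loop, part, hc]
    · simp only [cleanA_loop, part, hc, if_false, ih]
      rcases hp : part rs with ⟨b, f, a⟩
      cases f
      · simp
      · simp
        refine ⟨?_, ?_⟩ <;> · congr 2 <;> omega

-- phase 1 of A's loop (flag unset): it skips to the first quote, if any.
lemma cleanA_loop_open (s : List Char) :
    ∀ rest i beginning, cleanA_loop s i rest false beginning =
      if (part rest).2.1 then
        cleanA_loop s (i + (part rest).1.length + 1) (part rest).2.2 true (i + (part rest).1.length)
      else [String.ofList s] := by
  intro rest
  induction rest with
  | nil => intro i beginning; simp [cleanA_loop, part]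
  | cons c rs ih =>
    intro i beginning
    by_cases hc : c = '"'
    · simp [cleanA_loop, part, hc]
    · simp only [cleanA_loop, part, hc, if_false, ih]
      rcases hp : part rs with ⟨b, f, a⟩
      cases f
      · simp
      · simp
        rw [show i + 1 + b.length + 1 = i + (b.length + 1) + 1 from by omega,
            show i + 1 + b.length = i + (b.length + 1) from by omega]

-- ===== VERDICT (by name: the statement is the Claim_ definition above) =====
theorem cleanMetaString_spec : Claim_equal_cleanMetaString := by
  intro string _
  unfold Spec_cleanMetaString cleanMetaString cleanMetaString_alt
  set cs := string.toList with hcs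
  rw [cleanA_loop_open]
  by_cases h1 : (part cs).2.1 = true
  · rw [if_pos h1, cleanA_loop_closing]
    by_cases h2 : (part (part cs).2.2).2.1 = true
    · rw [if_pos h2, if_pos h1, if_pos h2]
      have e1 := part_spec cs h1
      have e2 := part_spec _ h2
      set b := (part cs).1
      set r2 := (part cs).2.2
      set ins := (part r2).1
      set aft := (part r2).2.2
      have hb : cs.take b.length = b := by rw [e1]; simp
      have hd : cs.drop b.length = '"' :: r2 := by rw [e1]; simp
      have harith : 0 + b.length + 1 + ins.length + 1 - (0 + b.length) = ins.length + 2 := by omega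
      have htake : ('"' :: r2).take (ins.length + 2) = '"' :: (ins ++ ['"']) := by
        rw [e2]
        show ('"' :: ins ++ '"' :: aft).take (ins.length + 2) = _
        have h : ins.length + 2 = ('"' :: ins).length + 1 := by simp
        rw [h, List.take_append]
        simp
      have hdrop : cs.drop (0 + b.length + 1 + ins.length + 1) = aft := by
        rw [e1, e2]
        have h : 0 + b.length + 1 + ins.length + 1 = (b ++ '"' :: ins ++ ['"']).length := by
          simp; omega
        have h' : b ++ '"' :: (ins ++ '"' :: aft) = (b ++ '"' :: ins ++ ['"']) ++ aft := by simp
        rw [h, h', List.drop_left]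
      rw [Nat.zero_add, hb, hd] at *
      rw [harith, htake, hdrop]
    · rw [Bool.not_eq_true] at h2
      rw [if_neg (by simp [h2]), if_pos h1, if_neg (by simp [h2])]
      simp [hcs]
  · rw [Bool.not_eq_true] at h1
    rw [if_neg (by simp [h1]), if_neg (by simp [h1])]
    simp [hcs]
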